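-- pv_equiv track=rewrite | github.com/ibrahimyuru/serit_algilama | main.py | cizgi_birlestirme
-- ===== SOURCE A (Python) =====
-- def cizgi_birlestirme(lines):
--     if not lines:
--         return None
--
--     x_min, y_min, x_max, y_max = lines[0]
--
--     for x1, y1, x2, y2 in lines:
--         x_min, y_min = min((x_min, y_min), (x1, y1), (x2, y2))
--         x_max, y_max = max((x_max, y_max), (x1, y1), (x2, y2))
--
--     return x_max, y_max, x_min, y_min
-- ===== SOURCE B (Python) =====
-- def cizgi_birlestirme(lines):
--     if not lines:
--         return None
--     points = []
--     for x1, y1, x2, y2 in lines: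
--         points.append((x1, y1))
--         points.append((x2, y2))
--     points = sorted(points)
--     return points[-1][0], points[-1][1], points[0][0], points[0][1]
-- ===== Notes on version B (the rewrite author's own statement) =====
-- stated objective: alternative
-- what changed: A keeps running lexicographic min/max tuples while scanning the lines; B flattens all endpoints into one point list, sorts it lexicographically, and reads the minimum and maximum off the two ends of the sorted list.
import Mathlib
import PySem

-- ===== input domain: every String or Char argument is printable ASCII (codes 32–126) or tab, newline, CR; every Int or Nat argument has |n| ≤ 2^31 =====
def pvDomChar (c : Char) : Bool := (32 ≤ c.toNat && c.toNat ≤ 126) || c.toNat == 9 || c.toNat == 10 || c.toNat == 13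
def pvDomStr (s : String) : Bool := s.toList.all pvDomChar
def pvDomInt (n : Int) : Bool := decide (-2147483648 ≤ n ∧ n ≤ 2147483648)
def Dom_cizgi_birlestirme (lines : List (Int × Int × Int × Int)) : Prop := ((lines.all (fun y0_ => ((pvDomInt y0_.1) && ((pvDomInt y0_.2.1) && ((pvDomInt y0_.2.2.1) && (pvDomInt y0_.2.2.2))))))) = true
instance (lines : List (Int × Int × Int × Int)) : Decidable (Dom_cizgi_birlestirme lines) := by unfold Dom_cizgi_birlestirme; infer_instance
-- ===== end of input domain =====

-- B collects every endpoint into one flat list and sorts it lexicographically, reading min/max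
-- at the ends, instead of A's running min/max scan; proved to return the same value (alternative).


-- ===== PORT A =====
-- Python tuple '<' on (Int, Int) pairs: lexicographic
def pvLt (p q : Int × Int) : Bool := p.1 < q.1 || (p.1 == q.1 && p.2 < q.2)

-- min(a, b) on tuples: b replaces a only when strictly smaller (ties keep the first)
def pvMin (p q : Int × Int) : Int × Int := if pvLt q p then q else p

-- max(a, b) on tuples: b replaces a only when strictly greater (ties keep the first)
def pvMax (p q : Int × Int) : Int × Int := if pvLt p q then q else p

def cizgi_birlestirme (lines : List (Int × Int × Int × Int)) : Option (Int × Int × Int × Int) :=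
  match lines with
  | [] => none
  | l0 :: _ =>
    -- x_min, y_min, x_max, y_max = lines[0]
    let st := lines.foldl
      (fun (s : (Int × Int) × (Int × Int)) l =>
        (pvMin (pvMin s.1 (l.1, l.2.1)) (l.2.2.1, l.2.2.2),
         pvMax (pvMax s.2 (l.1, l.2.1)) (l.2.2.1, l.2.2.2)))
      ((l0.1, l0.2.1), (l0.2.2.1, l0.2.2.2))
    some (st.2.1, st.2.2, st.1.1, st.1.2)

-- ===== PORT B =====
def cizgi_birlestirme_alt (lines : List (Int × Int × Int × Int)) : Option (Int × Int × Int × Int) :=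
  match lines with
  | [] => none
  | _ :: _ =>
    let points := lines.foldl
      (fun (acc : List (Int × Int)) l => acc ++ [(l.1, l.2.1)] ++ [(l.2.2.1, l.2.2.2)]) []
    let pts := PySem.List.sorted2 points (fun p => p.1) (fun p => p.2)
    match PySem.List.pyGet? pts (-1), PySem.List.pyGet? pts 0 with
    | some mx, some mn => some (mx.1, mx.2, mn.1, mn.2)
    | _, _ => none

-- ===== PRECONDITION & SPEC =====
def Spec_cizgi_birlestirme (lines : List (Int × Int × Int × Int)) (out : Option (Int × Int × Int × Int)) : Prop := out = cizgi_birlestirme_alt lines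
instance (lines : List (Int × Int × Int × Int)) (out : Option (Int × Int × Int × Int)) : Decidable (Spec_cizgi_birlestirme lines out) := by unfold Spec_cizgi_birlestirme; infer_instance

-- ===== CLAIM (what is proved, stated in full; the proofs are below) =====
def Claim_equal_cizgi_birlestirme : Prop := ∀ (lines : List (Int × Int × Int × Int)), Dom_cizgi_birlestirme lines → Spec_cizgi_birlestirme lines (cizgi_birlestirme lines)

-- ===== LEMMAS AND PROOFS =====

-- lexicographic ≤ on pairs of integers
def pvLe (p q : Int × Int) : Prop := p.1 < q.1 ∨ (p.1 = q.1 ∧ p.2 ≤ q.2)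

theorem pvLe_refl (p : Int × Int) : pvLe p p := Or.inr ⟨rfl, le_refl _⟩

theorem pvLe_trans {p q r : Int × Int} (h1 : pvLe p q) (h2 : pvLe q r) : pvLe q r → pvLe p r := by
  intro _
  rcases h1 with h1 | ⟨e1, h1⟩ <;> rcases h2 with h2 | ⟨e2, h2⟩ <;>
    first
      | exact Or.inl (by omega)
      | exact Or.inr ⟨by omega, by omega⟩

theorem pvLe_antisymm {p q : Int × Int} (h1 : pvLe p q) (h2 : pvLe q p) : p = q := by
  rcases h1 with h1 | ⟨e1, h1⟩ <;> rcases h2 with h2 | ⟨e2, h2⟩ <;>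
    exact Prod.ext (by omega) (by omega)

theorem pvLt_false_le {p q : Int × Int} (h : pvLt p q = false) : pvLe q p := by
  simp [pvLt] at h
  unfold pvLe
  omega

theorem pvLt_le {p q : Int × Int} (h : pvLt p q = true) : pvLe p q := by
  simp [pvLt] at h
  rcases h with h | ⟨h1, h2⟩
  · exact Or.inl h
  · exact Or.inr ⟨h1, le_of_lt h2⟩

-- the comparison sorted2 uses is exactly pvLt
theorem before_eq_pvLt (a b : Int × Int) :
    (decide (a.1 < b.1) || (!decide (b.1 < a.1) && decide (a.2 < b.2))) = pvLt a b := by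
  simp only [pvLt]
  by_cases h1 : a.1 < b.1 <;> by_cases h2 : b.1 < a.1 <;> by_cases h3 : a.1 = b.1 <;>
    simp_all <;> omega

-- insertBy with pvLt preserves Pairwise pvLe
theorem insertBy_pvLe (x : Int × Int) (ys : List (Int × Int))
    (h : ys.Pairwise pvLe) :
    (PySem.List.insertBy (fun a b => pvLt a b) x ys).Pairwise pvLe := by
  induction ys with
  | nil => simpa [PySem.List.insertBy] using List.pairwise_singleton _ _
  | cons y ys ih =>
    rcases List.pairwise_cons.mp h with ⟨hy, hys⟩
    by_cases hb : pvLt x y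
    · rw [PySem.List.insertBy, if_pos hb]
      refine List.pairwise_cons.mpr ⟨?_, h⟩
      intro z hz
      rcases List.mem_cons.mp hz with hz | hz
      · subst hz; exact pvLt_le hb
      · exact pvLe_trans (pvLt_le hb) (hy z hz) (hy z hz)
    · rw [PySem.List.insertBy, if_neg (by simp [hb])]
      refine List.pairwise_cons.mpr ⟨?_, ih hys⟩
      intro z hz
      have hz' : z ∈ x :: ys :=
        (PySem.List.insertBy_perm (fun a b => pvLt a b) x ys).mem_iff.mp hz
      rcases List.mem_cons.mp hz' with hz' | hz'
      · subst hz'; exact pvLt_false_le (by simpa using hb)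
      · exact hy z hz'

-- foldl insertBy from a Pairwise accumulator stays Pairwise
theorem foldl_insertBy_pvLe (pts : List (Int × Int)) (acc : List (Int × Int))
    (h : acc.Pairwise pvLe) :
    (pts.foldl (fun acc x => PySem.List.insertBy (fun a b => pvLt a b) x acc) acc).Pairwise pvLe := by
  induction pts generalizing acc with
  | nil => simpa using h
  | cons p ps ih => exact ih _ (insertBy_pvLe p acc h)

theorem sorted2_pairwise (pts : List (Int × Int)) :
    (PySem.List.sorted2 pts (fun p => p.1) (fun p => p.2)).Pairwise pvLe := by
  have : PySem.List.sorted2 pts (fun p => p.1) (fun p => p.2) =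
      pts.foldl (fun acc x => PySem.List.insertBy (fun a b => pvLt a b) x acc) [] := by
    simp only [PySem.List.sorted2]
    congr 1
    funext acc x
    congr 1
    funext a b
    exact before_eq_pvLt a b
  rw [this]
  exact foldl_insertBy_pvLe pts [] (List.Pairwise.nil)

-- head of a Pairwise-pvLe list is a lower bound
theorem pairwise_head_le {m : Int × Int} {t : List (Int × Int)}
    (h : (m :: t).Pairwise pvLe) : ∀ y ∈ m :: t, pvLe m y := by
  intro y hy
  rcases List.mem_cons.mp hy with hy | hy
  · subst hy; exact pvLe_refl _
  · exact (List.pairwise_cons.mp h).1 y hy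

-- last of a Pairwise-pvLe list is an upper bound
theorem pairwise_last_ge (l : List (Int × Int)) (hne : l ≠ [])
    (h : l.Pairwise pvLe) : ∀ y ∈ l, pvLe y (l.getLast hne) := by
  induction l with
  | nil => exact absurd rfl hne
  | cons m t ih =>
    intro y hy
    rcases List.pairwise_cons.mp h with ⟨hm, ht⟩
    cases t with
    | nil => simp at hy; subst hy; simp [List.getLast]; exact pvLe_refl _
    | cons a s =>
      have hlast : (m :: a :: s).getLast hne = (a :: s).getLast (by simp) := by
        simp [List.getLast]
      rw [hlast]
      rcases List.mem_cons.mp hy with hy | hy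
      · subst hy
        have := ih (by simp) ht
        have hmem : (a :: s).getLast (by simp) ∈ a :: s := List.getLast_mem _
        have h1 := hm _ hmem
        exact pvLe_trans h1 (pvLe_refl _) (pvLe_refl _)
      · exact ih (by simp) ht y hy

-- running pvMin: the fold result is a lower bound of init and pts, and lies among them
theorem foldl_pvMin_spec (pts : List (Int × Int)) (init : Int × Int) :
    (pvLe (pts.foldl pvMin init) init ∧ ∀ y ∈ pts, pvLe (pts.foldl pvMin init) y) ∧
      (pts.foldl pvMin init = init ∨ pts.foldl pvMin init ∈ pts) := by
  induction pts generalizing init with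
  | nil => exact ⟨⟨pvLe_refl _, by simp⟩, Or.inl rfl⟩
  | cons p ps ih =>
    have step : pvLe (pvMin init p) init ∧ pvLe (pvMin init p) p ∧
        (pvMin init p = init ∨ pvMin init p = p) := by
      by_cases hb : pvLt p init
      · exact ⟨by simpa [pvMin, hb] using pvLt_le hb, by simp [pvMin, hb, pvLe_refl],
          by simp [pvMin, hb]⟩
      · refine ⟨by simp [pvMin, hb, pvLe_refl], ?_, by simp [pvMin, hb]⟩
        simpa [pvMin, hb] using pvLt_false_le (by simpa using hb)
    obtain ⟨⟨h1, h2⟩, h3⟩ := ih (pvMin init p)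
    refine ⟨⟨pvLe_trans h1 step.1 step.1, ?_⟩, ?_⟩
    · intro y hy
      rcases List.mem_cons.mp hy with hy | hy
      · subst hy; exact pvLe_trans h1 step.2.1 step.2.1
      · exact h2 y hy
    · simp only [List.foldl_cons]
      rcases h3 with h3 | h3
      · rw [h3]; rcases step.2.2 with h | h
        · rw [h]; exact Or.inl rfl
        · rw [h]; exact Or.inr (by simp)
      · exact Or.inr (by simp [h3])

-- running pvMax: dual
theorem foldl_pvMax_spec (pts : List (Int × Int)) (init : Int × Int) :
    (pvLe init (pts.foldl pvMax init) ∧ ∀ y ∈ pts, pvLe y (pts.foldl pvMax init)) ∧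
      (pts.foldl pvMax init = init ∨ pts.foldl pvMax init ∈ pts) := by
  induction pts generalizing init with
  | nil => exact ⟨⟨pvLe_refl _, by simp⟩, Or.inl rfl⟩
  | cons p ps ih =>
    have step : pvLe init (pvMax init p) ∧ pvLe p (pvMax init p) ∧
        (pvMax init p = init ∨ pvMax init p = p) := by
      by_cases hb : pvLt init p
      · exact ⟨by simpa [pvMax, hb] using pvLt_le hb, by simp [pvMax, hb, pvLe_refl],
          by simp [pvMax, hb]⟩
      · refine ⟨by simp [pvMax, hb, pvLe_refl], ?_, by simp [pvMax, hb]⟩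
        simpa [pvMax, hb] using pvLt_false_le (by simpa using hb)
    obtain ⟨⟨h1, h2⟩, h3⟩ := ih (pvMax init p)
    refine ⟨⟨pvLe_trans step.1 h1 h1, ?_⟩, ?_⟩
    · intro y hy
      rcases List.mem_cons.mp hy with hy | hy
      · subst hy; exact pvLe_trans step.2.1 h1 h1
      · exact h2 y hy
    · simp only [List.foldl_cons]
      rcases h3 with h3 | h3
      · rw [h3]; rcases step.2.2 with h | h
        · rw [h]; exact Or.inl rfl
        · rw [h]; exact Or.inr (by simp)
      · exact Or.inr (by simp [h3])

-- the endpoint list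
def pvPts (lines : List (Int × Int × Int × Int)) : List (Int × Int) :=
  lines.flatMap (fun l => [(l.1, l.2.1), (l.2.2.1, l.2.2.2)])

-- B's append loop builds pvPts
theorem foldl_append_eq_pvPts (lines : List (Int × Int × Int × Int)) (acc : List (Int × Int)) :
    lines.foldl (fun acc l => acc ++ [(l.1, l.2.1)] ++ [(l.2.2.1, l.2.2.2)]) acc
      = acc ++ pvPts lines := by
  induction lines generalizing acc with
  | nil => simp [pvPts]
  | cons l ls ih =>
    simp only [List.foldl_cons]
    rw [ih]
    simp [pvPts, List.flatMap_cons]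

-- A's combined fold over lines is the pair of point folds over pvPts
theorem foldl_lines_eq_pts (lines : List (Int × Int × Int × Int)) (m M : Int × Int) :
    lines.foldl
      (fun (s : (Int × Int) × (Int × Int)) l =>
        (pvMin (pvMin s.1 (l.1, l.2.1)) (l.2.2.1, l.2.2.2),
         pvMax (pvMax s.2 (l.1, l.2.1)) (l.2.2.1, l.2.2.2))) (m, M)
      = ((pvPts lines).foldl pvMin m, (pvPts lines).foldl pvMax M) := by
  induction lines generalizing m M with
  | nil => simp [pvPts]
  | cons l ls ih => simp [pvPts, List.flatMap_cons, ih]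

-- ===== VERDICT (by name: the statement is the Claim_ definition above) =====
theorem cizgi_birlestirme_spec : Claim_equal_cizgi_birlestirme := by
  intro lines _
  unfold Spec_cizgi_birlestirme
  match hl : lines with
  | [] => rfl
  | l0 :: rest =>
    simp only [cizgi_birlestirme, cizgi_birlestirme_alt]
    rw [foldl_lines_eq_pts, foldl_append_eq_pvPts]
    simp only [List.nil_append]
    -- names for the objects compared
    set pts := pvPts (l0 :: rest) with hpts
    have hmem1 : (l0.1, l0.2.1) ∈ pts := by simp [hpts, pvPts, List.flatMap_cons]
    have hmem2 : (l0.2.2.1, l0.2.2.2) ∈ pts := by simp [hpts, pvPts, List.flatMap_cons]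
    set s := PySem.List.sorted2 pts (fun p => p.1) (fun p => p.2) with hs
    have hperm : s.Perm pts := PySem.List.sorted2_perm pts _ _ false
    have hsne : s ≠ [] := by
      intro h
      rw [h] at hperm
      have : pts = [] := hperm.symm.eq_nil
      simp [hpts, pvPts, List.flatMap_cons] at this
    have hpw : s.Pairwise pvLe := sorted2_pairwise pts
    -- s = head :: tail
    match hse : s with
    | [] => exact absurd rfl hsne
    | mn :: t =>
      -- A's min value
      obtain ⟨⟨_, hminlb⟩, hminmem⟩ := foldl_pvMin_spec pts (l0.1, l0.2.1)
      obtain ⟨⟨_, hmaxub⟩, hmaxmem⟩ := foldl_pvMax_spec pts (l0.2.2.1, l0.2.2.2)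
      have hminmem' : pts.foldl pvMin (l0.1, l0.2.1) ∈ pts := by
        rcases hminmem with h | h
        · rw [h]; exact hmem1
        · exact h
      have hmaxmem' : pts.foldl pvMax (l0.2.2.1, l0.2.2.2) ∈ pts := by
        rcases hmaxmem with h | h
        · rw [h]; exact hmem2
        · exact h
      -- B's ends
      have hmn_mem : mn ∈ pts := hperm.mem_iff.mp (by simp)
      have hlast_mem : (mn :: t).getLast (by simp) ∈ pts :=
        hperm.mem_iff.mp (List.getLast_mem _)
      have hmn_lb : ∀ y ∈ pts, pvLe mn y := by
        intro y hy
        exact pairwise_head_le hpw y (hperm.mem_iff.mpr hy)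
      have hlast_ub : ∀ y ∈ pts, pvLe y ((mn :: t).getLast (by simp)) := by
        intro y hy
        exact pairwise_last_ge (mn :: t) (by simp) hpw y (hperm.mem_iff.mpr hy)
      have hmin_eq : pts.foldl pvMin (l0.1, l0.2.1) = mn :=
        pvLe_antisymm (hminlb mn hmn_mem) (hmn_lb _ hminmem')
      have hmax_eq : pts.foldl pvMax (l0.2.2.1, l0.2.2.2) = (mn :: t).getLast (by simp) :=
        pvLe_antisymm (hlast_ub _ hmaxmem') (hmaxub _ hlast_mem)
      rw [PySem.List.pyGet?_neg_one, PySem.List.pyGet?_zero]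
      rw [List.getLast?_eq_some_getLast (show (mn :: t) ≠ [] by simp)]
      simp only [List.getElem?_cons_zero]
      simp [hmin_eq, hmax_eq]
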